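-- pv_equiv track=rewrite | github.com/bigwolfeman/Document-MCP | backend/src/services/vault.py | validate_note_path
-- ===== SOURCE A (Python) =====
-- from typing import Any, Dict, List, Tuple
--
-- INVALID_PATH_CHARS = {'<', '>', ':', '"', '|', '?', '*'}
--
-- def validate_note_path(note_path: str) -> Tuple[bool, str]:
--     """
--     Validate a relative Markdown path.
--
--     Returns (is_valid, message). Message is empty when valid.
--     """
--     if not note_path or len(note_path) > 256:
--         return False, "Path must be 1-256 characters"
--     if not note_path.endswith(".md"):
--         return False, "Path must end with .md"
--     if ".." in note_path:
--         return False, "Path must not contain '..'"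
--     if "\\" in note_path:
--         return False, "Path must use Unix separators (/)"
--     if note_path.startswith("/"):
--         return False, "Path must be relative (no leading /)"
--     if any(char in INVALID_PATH_CHARS for char in note_path):
--         return False, "Path contains invalid characters"
--     return True, ""
-- ===== SOURCE B (Python) =====
-- # B: one character-scan with an accumulator (length, first char, last three chars, flags)
-- # instead of staged substring/suffix scans; identical messages and priority order.
-- INVALID_PATH_CHARS = {'<', '>', ':', '"', '|', '?', '*'}
--
-- def validate_note_path(note_path):
--     n = 0
--     first = p3 = p2 = p1 = None
--     has_dotdot = has_backslash = has_invalid = False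
--     for c in note_path:
--         n += 1
--         if first is None:
--             first = c
--         if p1 == '.' and c == '.':
--             has_dotdot = True
--         if c == '\\':
--             has_backslash = True
--         if c in INVALID_PATH_CHARS:
--             has_invalid = True
--         p3, p2, p1 = p2, p1, c
--     if n == 0 or n > 256:
--         return False, "Path must be 1-256 characters"
--     if (p3, p2, p1) != ('.', 'm', 'd'):
--         return False, "Path must end with .md"
--     if has_dotdot:
--         return False, "Path must not contain '..'"
--     if has_backslash:
--         return False, "Path must use Unix separators (/)"
--     if first == '/':
--         return False, "Path must be relative (no leading /)"
--     if has_invalid: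
--         return False, "Path contains invalid characters"
--     return True, ""
-- ===== Notes on version B (the rewrite author's own statement) =====
-- stated objective: alternative
-- what changed: Replaced the chain of substring/suffix/prefix scans by a single left-to-right character scan that accumulates the length, the first character, the last three characters and flags for a repeated dot, a backslash and an invalid character, then maps the accumulated facts to the same messages in the same priority order.
import Mathlib
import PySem

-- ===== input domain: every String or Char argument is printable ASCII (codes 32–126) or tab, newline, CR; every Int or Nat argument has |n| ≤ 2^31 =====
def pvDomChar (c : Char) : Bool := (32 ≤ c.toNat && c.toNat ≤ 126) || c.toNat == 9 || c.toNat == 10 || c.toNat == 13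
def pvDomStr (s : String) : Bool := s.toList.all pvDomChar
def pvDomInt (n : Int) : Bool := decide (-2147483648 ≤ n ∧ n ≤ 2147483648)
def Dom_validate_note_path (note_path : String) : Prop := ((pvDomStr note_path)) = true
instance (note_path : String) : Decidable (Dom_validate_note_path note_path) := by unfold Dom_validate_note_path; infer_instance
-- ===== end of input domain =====

-- B replaces A's staged substring/suffix/prefix scans by a single character scan with an accumulator (alternative decomposition; same cost).

-- ===== PORT A =====
def INVALID_PATH_CHARS : PySem.Set Char := PySem.Set.ofList ['<', '>', ':', '"', '|', '?', '*']

def validate_note_path (note_path : String) : Bool × String :=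
  if note_path == "" || 256 < PySem.Str.len note_path then (false, "Path must be 1-256 characters")
  else if !(PySem.Str.endswith note_path ".md") then (false, "Path must end with .md")
  else if PySem.Str.isIn ".." note_path then (false, "Path must not contain '..'")
  else if PySem.Str.isIn "\\" note_path then (false, "Path must use Unix separators (/)")
  else if PySem.Str.startswith note_path "/" then (false, "Path must be relative (no leading /)")
  else if note_path.toList.any (fun c => PySem.Set.contains INVALID_PATH_CHARS c) then (false, "Path contains invalid characters")
  else (true, "")

-- ===== PORT B =====
-- B's fold state: running length, first char, last three chars, and the three flags.
structure ScanSt where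
  n : Nat
  first : Option Char
  p3 : Option Char
  p2 : Option Char
  p1 : Option Char
  dotdot : Bool
  bs : Bool
  inv : Bool
deriving Repr, DecidableEq
def scanStep (st : ScanSt) (c : Char) : ScanSt :=
  { n := st.n + 1
    first := match st.first with | none => some c | some f => some f
    p3 := st.p2
    p2 := st.p1
    p1 := some c
    dotdot := st.dotdot || (st.p1 == some '.' && c == '.')
    bs := st.bs || (c == '\\')
    inv := st.inv || PySem.Set.contains INVALID_PATH_CHARS c }
def scanInit : ScanSt := ⟨0, none, none, none, none, false, false, false⟩

def validate_note_path_alt (note_path : String) : Bool × String :=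
  let st := note_path.toList.foldl scanStep scanInit
  if st.n == 0 || 256 < st.n then (false, "Path must be 1-256 characters")
  else if !(st.p3 == some '.' && st.p2 == some 'm' && st.p1 == some 'd') then (false, "Path must end with .md")
  else if st.dotdot then (false, "Path must not contain '..'")
  else if st.bs then (false, "Path must use Unix separators (/)")
  else if st.first == some '/' then (false, "Path must be relative (no leading /)")
  else if st.inv then (false, "Path contains invalid characters")
  else (true, "")

-- ===== PRECONDITION & SPEC =====
def Spec_validate_note_path (note_path : String) (out : Bool × String) : Prop := out = validate_note_path_alt note_path
instance (note_path : String) (out : Bool × String) : Decidable (Spec_validate_note_path note_path out) := by unfold Spec_validate_note_path; infer_instance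

-- ===== CLAIM =====
def Claim_equal_validate_note_path : Prop := ∀ (note_path : String), Dom_validate_note_path note_path → Spec_validate_note_path note_path (validate_note_path note_path)

-- ===== LEMMAS AND PROOFS =====

theorem scan_spec (cs : List Char) :
    (cs.foldl scanStep scanInit).n = cs.length ∧
    (cs.foldl scanStep scanInit).first = cs.head? ∧
    (cs.foldl scanStep scanInit).p1 = cs.reverse.head? ∧
    (cs.foldl scanStep scanInit).p2 = cs.reverse.tail.head? ∧
    (cs.foldl scanStep scanInit).p3 = cs.reverse.tail.tail.head? ∧
    ((cs.foldl scanStep scanInit).dotdot = true ↔ ['.','.'] <:+: cs) ∧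
    ((cs.foldl scanStep scanInit).bs = true ↔ ['\\'] <:+: cs) ∧
    (cs.foldl scanStep scanInit).inv = cs.any (fun c => PySem.Set.contains INVALID_PATH_CHARS c) := by
  induction cs using List.reverseRecOn with
  | nil => simp [scanInit]
  | append_singleton l c ih =>
    obtain ⟨hn, hf, h1, h2, h3, hd, hb, hi⟩ := ih
    refine ⟨?_, ?_, ?_, ?_, ?_, ?_, ?_, ?_⟩ <;>
      simp only [List.foldl_append, List.foldl_cons, List.foldl_nil, scanStep]
    · simp [hn]
    · cases l with
      | nil => simp [scanInit]
      | cons a t => simp at hf ⊢; simp [hf]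
    · simp
    · simp [h1]
    · simp [h2]
    · rw [← List.reverse_infix]
      simp only [List.reverse_append, List.reverse_cons, List.reverse_nil, List.nil_append,
        List.singleton_append, List.infix_cons_iff]
      constructor
      · intro h
        rcases Bool.or_eq_true_iff.mp h with h | h
        · right; simpa using List.reverse_infix.mpr (hd.mp h)
        · left
          simp at h
          obtain ⟨hp, hc⟩ := h
          subst hc
          rw [h1] at hp
          cases hr : l.reverse with
          | nil => rw [hr] at hp; simp at hp
          | cons a t => rw [hr] at hp; simp at hp; subst hp; exact List.cons_prefix_cons.mpr ⟨rfl, List.cons_prefix_cons.mpr ⟨rfl, List.nil_prefix⟩⟩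
      · intro h
        rcases h with h | h
        · refine Bool.or_eq_true_iff.mpr (Or.inr ?_)
          rcases List.cons_prefix_cons.mp h with ⟨hc, hp⟩
          subst hc
          cases hr : l.reverse with
          | nil => rw [hr] at hp; simp at hp
          | cons a t =>
            rw [hr] at hp
            rcases List.cons_prefix_cons.mp hp with ⟨ha, _⟩
            subst ha
            simp [h1, hr]
        · refine Bool.or_eq_true_iff.mpr (Or.inl (hd.mpr ?_))
          have : (['.','.'] : List Char).reverse <:+: l.reverse := by simpa using h
          exact List.reverse_infix.mp this
    · simp only [List.singleton_infix_iff] at hb ⊢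
      simp [hb]
      tauto
    · simp [hi]

theorem suffix3 (cs : List Char) : (['.','m','d'] <:+ cs) ↔
    (cs.reverse.tail.tail.head? = some '.' ∧ cs.reverse.tail.head? = some 'm' ∧ cs.reverse.head? = some 'd') := by
  rw [← List.reverse_prefix]
  cases hr : cs.reverse with
  | nil => simp
  | cons a t => cases t with
    | nil => simp [List.cons_prefix_cons]
    | cons b u => cases u with
      | nil => simp [List.cons_prefix_cons]
      | cons e v => simp [List.cons_prefix_cons]; aesop

theorem prefix1 (cs : List Char) : (['/'] <+: cs) ↔ cs.head? = some '/' := by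
  cases cs <;> simp [List.cons_prefix_cons, eq_comm]

theorem validate_note_path_eq_alt (np : String) : validate_note_path np = validate_note_path_alt np := by
  unfold validate_note_path validate_note_path_alt
  obtain ⟨hn, hf, h1, h2, h3, hd, hb, hi⟩ := scan_spec np.toList
  have e1 : ((np.toList.foldl scanStep scanInit).n == 0 || decide (256 < (np.toList.foldl scanStep scanInit).n))
      = (np == "" || decide (256 < PySem.Str.len np)) := by
    rw [hn]
    have : (np == "") = (np.toList.length == 0) := by
      rw [Bool.eq_iff_iff, beq_iff_eq, beq_iff_eq, List.length_eq_zero_iff]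
      exact String.toList_eq_nil_iff.symm
    rw [this]
    simp [PySem.Str.len_eq]
  have e2 : ((np.toList.foldl scanStep scanInit).p3 == some '.' && (np.toList.foldl scanStep scanInit).p2 == some 'm' && (np.toList.foldl scanStep scanInit).p1 == some 'd')
      = PySem.Str.endswith np ".md" := by
    rw [h1, h2, h3]
    rw [Bool.eq_iff_iff]
    simp only [Bool.and_eq_true, beq_iff_eq]
    rw [show PySem.Str.endswith np ".md" = PySem.Chars.endswith np.toList ['.','m','d'] by simp]
    rw [PySem.Chars.endswith_iff, suffix3]
    tauto
  have e3 : (np.toList.foldl scanStep scanInit).dotdot = PySem.Str.isIn ".." np := by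
    rw [Bool.eq_iff_iff, hd, PySem.Str.isIn_iff_infix]
    rfl
  have e4 : (np.toList.foldl scanStep scanInit).bs = PySem.Str.isIn "\\" np := by
    rw [Bool.eq_iff_iff, hb, PySem.Str.isIn_iff_infix]
    rfl
  have e5 : ((np.toList.foldl scanStep scanInit).first == some '/') = PySem.Str.startswith np "/" := by
    rw [hf, Bool.eq_iff_iff]
    rw [show PySem.Str.startswith np "/" = PySem.Chars.startswith np.toList ['/'] by simp]
    rw [PySem.Chars.startswith_iff, prefix1]
    simp
  simp only [e1, e2, e3, e4, e5, hi]

-- ===== VERDICT =====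
theorem validate_note_path_spec : Claim_equal_validate_note_path := by
  intro np _
  unfold Spec_validate_note_path
  exact validate_note_path_eq_alt np
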